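-- pv_equiv track=rewrite | github.com/limdongsun0814/Algorithm | 프로그래머스/2/60057. 문자열 압축/문자열 압축.py | tranfrom
-- ===== SOURCE A (Python) =====
-- def tranfrom(s,n):
--     result=""
--     stack = s[:n]
--     index = n
--     cnt=1
--     while index<len(s):
--         newValue = s[index:index+n]
--         if stack == newValue:
--             cnt+=1
--         else:
--             if cnt != 1:
--                 result+=str(cnt)+stack
--             else:
--                 result+=stack
--
--             stack=newValue
--             cnt=1
--         index+=n
--     if cnt != 1:
--         result+=str(cnt)+stack
--     else:
--         result+=stack
--     return result
-- ===== SOURCE B (Python) =====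
-- def tranfrom(s, n):
--     # Phase 1: cut s into fixed-size chunks with an explicit index loop.
--     chunks = []
--     i = 0
--     while i < len(s):
--         chunks.append(s[i:i+n])
--         i += n
--     # Phase 2: group equal consecutive chunks by scanning each run's extent.
--     pieces = []
--     while chunks:
--         c = chunks[0]
--         run = 0
--         while run < len(chunks) and chunks[run] == c:
--             run += 1
--         pieces.append(c if run == 1 else str(run) + c)
--         chunks = chunks[run:]
--     return "".join(pieces)
-- ===== Notes on version B (the rewrite author's own statement) =====
-- stated objective: alternative
-- what changed: Replaced A's single-pass index/stack/cnt state machine over the raw string by a two-phase computation: first build the list of fixed-size chunks, then group equal consecutive chunks by scanning each run's extent and join the rendered pieces.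
import Mathlib
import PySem

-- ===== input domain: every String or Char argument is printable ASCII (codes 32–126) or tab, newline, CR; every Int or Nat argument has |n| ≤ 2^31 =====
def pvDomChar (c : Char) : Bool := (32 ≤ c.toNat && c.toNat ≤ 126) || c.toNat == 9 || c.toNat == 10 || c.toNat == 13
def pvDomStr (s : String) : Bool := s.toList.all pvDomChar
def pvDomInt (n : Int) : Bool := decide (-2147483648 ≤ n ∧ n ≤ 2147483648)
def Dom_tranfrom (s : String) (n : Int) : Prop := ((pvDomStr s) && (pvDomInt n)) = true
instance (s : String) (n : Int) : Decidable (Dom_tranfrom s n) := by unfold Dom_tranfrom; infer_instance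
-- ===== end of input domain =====

-- B replaces A's single-pass index/stack/cnt state machine by a chunk-then-group two-phase
-- computation (alternative decomposition, same cost). Pre_ excludes n ≤ 0 with nonempty s
-- (and n < 0 with empty s), where Python A loops forever.


-- ===== PORT A =====
-- 'result += str(cnt)+stack  /  result += stack' (the trailing if cnt != 1 branch pair)
def tfEmit (result stack : List Char) (cnt : Int) : List Char :=
  if cnt ≠ 1 then result ++ (PySem.Int.toStr cnt).toList ++ stack else result ++ stack

-- the while loop; fuel bounds the iteration count (s.length suffices whenever A terminates)
def tfLoop (s : List Char) (n : Int) : Nat → List Char → List Char → Int → Int → List Char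
  | 0, result, stack, cnt, _ => tfEmit result stack cnt
  | fuel + 1, result, stack, cnt, index =>
    if index < (s.length : Int) then
      let newValue := PySem.List.slice s (some index) (some (index + n))
      if stack = newValue then
        tfLoop s n fuel result stack (cnt + 1) (index + n)
      else
        tfLoop s n fuel (tfEmit result stack cnt) newValue 1 (index + n)
    else
      tfEmit result stack cnt

def tranfrom (s : String) (n : Int) : String :=
  String.ofList
    (tfLoop s.toList n s.toList.length [] (PySem.List.slice s.toList none (some n)) 1 n)

-- ===== PORT B =====
-- phase 1: while i < len(s): chunks.append(s[i:i+n]); i += n   (fuel = len s bounds the iterations)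
def tfChunks (s : List Char) (n : Int) : Nat → Int → List (List Char)
  | 0, _ => []
  | fuel + 1, i =>
    if i < (s.length : Int) then
      PySem.List.slice s (some i) (some (i + n)) :: tfChunks s n fuel (i + n)
    else []

-- phase 2: while chunks: measure the run of the leading chunk, render a piece, drop the run
def tfGroup : List (List Char) → List (List Char)
  | [] => []
  | c :: cs =>
    let run := ((c :: cs).takeWhile (· == c)).length
    (if run = 1 then c else (PySem.Int.toStr (run : Int)).toList ++ c) :: tfGroup ((c :: cs).drop run)
  termination_by l => l.length
  decreasing_by
    simp only [List.takeWhile_cons, beq_self_eq_true, if_true, List.length_cons,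
      List.drop_succ_cons, List.length_drop]
    omega

def tranfrom_alt (s : String) (n : Int) : String :=
  String.ofList (List.flatten (tfGroup (tfChunks s.toList n s.toList.length 0)))

-- ===== PRECONDITION & SPEC =====
-- Python A loops forever when n ≤ 0 and s is nonempty, and when n < 0 and s is empty;
-- Pre_ admits exactly the inputs on which A returns.
def Pre_tranfrom (s : String) (n : Int) : Prop := 1 ≤ n ∨ (s = "" ∧ 0 ≤ n)
instance (s : String) (n : Int) : Decidable (Pre_tranfrom s n) := by unfold Pre_tranfrom; infer_instance
def pvWitness_tranfrom : String × Int := ("aaabbacccc", 2)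

def Spec_tranfrom (s : String) (n : Int) (out : String) : Prop := out = tranfrom_alt s n
instance (s : String) (n : Int) (out : String) : Decidable (Spec_tranfrom s n out) := by unfold Spec_tranfrom; infer_instance

-- ===== CLAIM (what is proved, stated in full; the proofs are below) =====
def Claim_equal_tranfrom : Prop := ∀ (s : String) (n : Int), Dom_tranfrom s n → Pre_tranfrom s n → Spec_tranfrom s n (tranfrom s n)

-- ===== LEMMAS AND PROOFS =====

-- reference processing of a chunk list with a pending (stack, cnt) run, used to relate the two ports
def tfProc : List (List Char) → List Char → Int → List Char
  | [], stack, cnt => tfEmit [] stack cnt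
  | c :: cs, stack, cnt =>
    if stack = c then tfProc cs stack (cnt + 1) else tfEmit [] stack cnt ++ tfProc cs c 1

theorem tfEmit_eq (result stack : List Char) (cnt : Int) :
    tfEmit result stack cnt = result ++ tfEmit [] stack cnt := by
  unfold tfEmit; split <;> simp

-- A's loop = processing the chunk list that starts at the same index (same fuel on both sides)
theorem tfLoop_eq_proc (s : List Char) (n : Int) :
    ∀ (fuel : Nat) (result stack : List Char) (cnt index : Int),
      tfLoop s n fuel result stack cnt index =
        result ++ tfProc (tfChunks s n fuel index) stack cnt := by
  intro fuel
  induction fuel with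
  | zero =>
    intro result stack cnt index
    show tfEmit result stack cnt = result ++ tfProc [] stack cnt
    simp only [tfProc]
    exact tfEmit_eq result stack cnt
  | succ f ih =>
    intro result stack cnt index
    simp only [tfLoop, tfChunks]
    by_cases hc : index < (s.length : Int)
    · simp only [if_pos hc, tfProc]
      by_cases hsv : stack = PySem.List.slice s (some index) (some (index + n))
      · simp only [if_pos hsv]
        exact ih result stack (cnt + 1) (index + n)
      · simp only [if_neg hsv]
        rw [ih (tfEmit result stack cnt) _ 1 (index + n), tfEmit_eq, List.append_assoc]
    · simp only [if_neg hc, tfProc]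
      exact tfEmit_eq result stack cnt

-- enough fuel: adding one more unit does not change the chunk list
theorem tfChunks_fuel_succ (s : List Char) (n : Int) (hn : 1 ≤ n) :
    ∀ (fuel : Nat) (i : Int), (s.length : Int) ≤ i + fuel →
      tfChunks s n fuel i = tfChunks s n (fuel + 1) i := by
  intro fuel
  induction fuel with
  | zero =>
    intro i h
    have hni : ¬ i < (s.length : Int) := by omega
    simp [tfChunks, hni]
  | succ f ih =>
    intro i h
    conv_lhs => rw [tfChunks]
    conv_rhs => rw [tfChunks]
    by_cases hc : i < (s.length : Int)
    · simp only [if_pos hc]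
      rw [ih (i + n) (by push_cast at h ⊢; omega)]
    · simp only [if_neg hc]

-- processing a pending run: absorb the leading equal chunks, then emit and continue fresh
theorem tfProc_run (c : List Char) :
    ∀ (cs : List (List Char)) (k : Int),
      tfProc cs c k =
        tfEmit [] c (k + ((cs.takeWhile (· == c)).length : Int)) ++
          (match cs.dropWhile (· == c) with
           | [] => []
           | d :: ds => tfProc ds d 1) := by
  intro cs
  induction cs with
  | nil => intro k; simp [tfProc]
  | cons d ds ih =>
    intro k
    by_cases hdc : c = d
    · subst hdc
      simp only [tfProc, List.takeWhile_cons, beq_self_eq_true, if_true,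
        List.dropWhile_cons, List.length_cons]
      rw [ih (k + 1)]
      congr 2
      push_cast; ring
    · have hb : (d == c) = false := by
        simp only [beq_eq_false_iff_ne, ne_eq]
        exact fun h => hdc h.symm
      simp only [tfProc, List.takeWhile_cons, List.dropWhile_cons, hb, if_neg hdc,
        Bool.false_eq_true, if_false, List.length_nil, Int.ofNat_zero, add_zero]

-- drop past the takeWhile prefix is dropWhile
theorem drop_takeWhile_len {α : Type} (p : α → Bool) (l : List α) :
    l.drop (l.takeWhile p).length = l.dropWhile p := by
  calc l.drop (l.takeWhile p).length
      = (l.takeWhile p ++ l.dropWhile p).drop (l.takeWhile p).length := by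
        rw [List.takeWhile_append_dropWhile]
    _ = l.dropWhile p := List.drop_left

-- a rendered piece is tfEmit of the run length
theorem piece_eq_emit (c : List Char) (run : Nat) :
    (if run = 1 then c else (PySem.Int.toStr (run : Int)).toList ++ c) = tfEmit [] c (run : Int) := by
  unfold tfEmit
  by_cases h : run = 1 <;> simp [h]

-- B's grouping, flattened, equals processing with the head chunk pending once
theorem tfGroup_flatten (l : List (List Char)) :
    List.flatten (tfGroup l) =
      (match l with | [] => [] | c :: cs => tfProc cs c 1) := by
  induction l using tfGroup.induct with
  | case1 => simp [tfGroup]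
  | case2 c cs run ih =>
    have hrun : run = (cs.takeWhile (· == c)).length + 1 := by
      simp [run]
    have hdrop : (c :: cs).drop run = cs.dropWhile (· == c) := by
      rw [hrun, List.drop_succ_cons, drop_takeWhile_len]
    rw [hdrop] at ih
    simp only [tfGroup, List.flatten_cons]
    rw [tfProc_run c cs 1]
    have hlen : (List.takeWhile (· == c) (c :: cs)).length = (cs.takeWhile (· == c)).length + 1 := by
      simp
    rw [hlen, piece_eq_emit c ((cs.takeWhile (· == c)).length + 1),
      List.drop_succ_cons, drop_takeWhile_len]
    have hcast : ((((cs.takeWhile (· == c)).length + 1 : Nat)) : Int)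
        = 1 + ((cs.takeWhile (· == c)).length : Int) := by push_cast; ring
    rw [hcast]
    cases hdw : cs.dropWhile (· == c) with
    | nil => simp [tfGroup]
    | cons d ds => rw [hdw] at ih; rw [ih]

-- ===== VERDICT (by name: the statement is the Claim_ definition above) =====
theorem tranfrom_spec : Claim_equal_tranfrom := by
  intro s n _ hpre
  unfold Spec_tranfrom tranfrom tranfrom_alt
  by_cases hs : s.toList = []
  · have hn : 0 ≤ n := by
      rcases hpre with h | ⟨_, h⟩
      · omega
      · exact h
    rw [hs]
    simp [tfLoop, tfChunks, tfGroup, tfEmit, PySem.List.slice_to ([] : List Char) hn]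
  · have hn : 1 ≤ n := by
      rcases hpre with h | ⟨h, _⟩
      · exact h
      · exact absurd (by simp [h]) hs
    obtain ⟨m, hm⟩ : ∃ m, s.toList.length = m + 1 := by
      cases h : s.toList with
      | nil => exact absurd h hs
      | cons a l => exact ⟨l.length, rfl⟩
    rw [tfLoop_eq_proc, List.nil_append, hm]
    have hchunks : tfChunks s.toList n (m + 1) 0 =
        PySem.List.slice s.toList none (some n) :: tfChunks s.toList n m n := by
      conv_lhs => rw [tfChunks]
      rw [if_pos (by rw [hm]; push_cast; omega), zero_add]
      simp
    rw [hchunks, tfGroup_flatten]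
    rw [tfChunks_fuel_succ s.toList n hn m n (by rw [hm]; push_cast; omega)]
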